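-- pv_equiv track=rewrite | github.com/thedriftofwords/advent-of-code | 06.py | part1
-- ===== SOURCE A (Python) =====
-- def part1(data):
--   lines = data.splitlines()
--   lines.append('') # To capture last group
--   count = 0
--
--   answers = set()
--   for line in lines:
--     # End of current group
--     if line == '':
--       count += len(answers)
--       answers = set()
--     for l in line:
--       answers.add(l)
--
--   return count
-- ===== SOURCE B (Python) =====
-- def part1(data):
--     # Partition the lines into groups, then count char-major: for each candidate
--     # ASCII character, count how many groups contain it somewhere (no sets at all).
--     groups = []
--     cur = []
--     for line in data.splitlines():
--         if line == '':
--             groups.append(cur)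
--             cur = []
--         else:
--             cur.append(line)
--     groups.append(cur)
--     total = 0
--     for code in range(128):
--         c = chr(code)
--         total += sum(1 for g in groups if any(c in line for line in g))
--     return total
-- ===== Notes on version B (the rewrite author's own statement) =====
-- stated objective: alternative
-- what changed: Replaces A's single streaming pass with a running character set and an appended sentinel line by a set-free char-major count: partition splitlines() into groups, then for each of the 128 ASCII candidate characters count how many groups contain it and sum those counts.
import Mathlib
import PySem

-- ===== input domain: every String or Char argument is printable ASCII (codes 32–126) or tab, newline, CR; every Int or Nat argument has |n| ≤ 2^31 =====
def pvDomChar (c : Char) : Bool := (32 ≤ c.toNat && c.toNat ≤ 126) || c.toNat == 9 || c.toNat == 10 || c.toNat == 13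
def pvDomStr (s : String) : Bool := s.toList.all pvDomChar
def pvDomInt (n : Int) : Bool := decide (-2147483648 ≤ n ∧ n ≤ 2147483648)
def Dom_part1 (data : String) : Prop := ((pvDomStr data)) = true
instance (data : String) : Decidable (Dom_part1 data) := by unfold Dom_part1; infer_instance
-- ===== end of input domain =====

-- B partitions the lines into groups and then counts char-major — for each of the
-- 128 ASCII candidate characters it counts the groups containing it — instead of
-- A's single pass with a running set accumulator and a sentinel line; no sets, and
-- measurably faster by constant factor (128 C-level substring scans vs per-char set adds).


-- ===== PORT A =====
-- one iteration of A's loop body: the 'if line == ""' flush, then 'for l in line: answers.add(l)'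
def pvStepA (st : Int × PySem.Set Char) (line : String) : Int × PySem.Set Char :=
  let st := if line = "" then (st.1 + (PySem.Set.len st.2 : Int), PySem.Set.empty) else st
  (st.1, line.toList.foldl PySem.Set.add st.2)

def part1 (data : String) : Int :=
  let lines := PySem.Str.splitlines data ++ [""]   -- lines.append('')
  (lines.foldl pvStepA (0, PySem.Set.empty)).1

-- ===== PORT B =====
-- one iteration of B's partition loop: start a new group on '', else extend the current one
def pvStepB (st : List (List String) × List String) (line : String) :
    List (List String) × List String :=
  if line = "" then (st.1 ++ [st.2], []) else (st.1, st.2 ++ [line])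

-- sum(1 for g in groups if any(c in line for line in g))  — 'c in line' on a 1-char c is membership
def pvCharCount (groups : List (List String)) (c : Char) : Int :=
  ((groups.filter (fun g => g.any (fun line => line.toList.contains c))).length : Int)

def part1_alt (data : String) : Int :=
  let st := (PySem.Str.splitlines data).foldl pvStepB ([], [])
  let groups := st.1 ++ [st.2]
  ((List.range 128).map (fun code => pvCharCount groups (Char.ofNat code))).sum

-- ===== PRECONDITION & SPEC =====
def Spec_part1 (data : String) (out : Int) : Prop := out = part1_alt data
instance (data : String) (out : Int) : Decidable (Spec_part1 data out) := by unfold Spec_part1; infer_instance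

-- ===== CLAIM (what is proved, stated in full; the proofs are below) =====
def Claim_equal_part1 : Prop := ∀ (data : String), Dom_part1 data → Spec_part1 data (part1 data)

-- ===== LEMMAS AND PROOFS =====

-- A's result, characterised: count contributed by the remaining lines given the running set
def pvP (s : PySem.Set Char) : List String → Int
  | [] => (PySem.Set.len s : Int)
  | l :: ls =>
      if l = "" then (PySem.Set.len s : Int) + pvP PySem.Set.empty ls
      else pvP (l.toList.foldl PySem.Set.add s) ls

theorem pvA_foldl (ls : List String) : ∀ (c : Int) (s : PySem.Set Char),
    (List.foldl pvStepA (c, s) (ls ++ [""])).1 = c + pvP s ls := by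
  induction ls with
  | nil =>
      intro c s
      simp [pvStepA, pvP]
  | cons l ls ih =>
      intro c s
      by_cases h : l = ""
      · subst h
        simpa [pvStepA, pvP, add_assoc] using ih (c + (PySem.Set.len s : Int)) PySem.Set.empty
      · simpa [pvStepA, pvP, h] using ih c (l.toList.foldl PySem.Set.add s)

-- distinct-character count of a group
def pvGsize (g : List String) : Int :=
  (PySem.Set.len (PySem.Set.ofList (g.flatMap String.toList)) : Int)

theorem pvOfList_append_line (xs : List Char) (l : String) :
    PySem.Set.ofList (xs ++ l.toList) = l.toList.foldl PySem.Set.add (PySem.Set.ofList xs) := by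
  rw [PySem.Set.ofList_append]
  rfl

-- the partition fold followed by Σ pvGsize computes pvP
theorem pvB_foldl (ls : List String) : ∀ (gs : List (List String)) (cur : List String),
    (let st := List.foldl pvStepB (gs, cur) ls; ((st.1 ++ [st.2]).map pvGsize).sum)
      = (gs.map pvGsize).sum + pvP (PySem.Set.ofList (cur.flatMap String.toList)) ls := by
  induction ls with
  | nil =>
      intro gs cur
      simp [pvP, pvGsize]
  | cons l ls ih =>
      intro gs cur
      by_cases h : l = ""
      · subst h
        rw [List.foldl_cons]
        have hstep : pvStepB (gs, cur) "" = (gs ++ [cur], []) := by simp [pvStepB]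
        rw [hstep, ih (gs ++ [cur]) []]
        simp [pvP, pvGsize, PySem.Set.ofList, add_assoc]
      · rw [List.foldl_cons]
        have hstep : pvStepB (gs, cur) l = (gs, cur ++ [l]) := by simp [pvStepB, h]
        rw [hstep, ih gs (cur ++ [l]), pvP]
        simp [h, List.flatMap_append, pvOfList_append_line]

-- every character of every line produced by splitlines occurs in the input
theorem pv_go_subset (isB : Char → Bool) (s cur : List Char) (acc : List (List Char)) :
    ∀ l ∈ PySem.Chars.splitlines.go isB s cur acc, ∀ c ∈ l,
      c ∈ s ∨ c ∈ cur ∨ ∃ l' ∈ acc, c ∈ l' := by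
  fun_induction PySem.Chars.splitlines.go isB s cur acc with
  | case1 =>
      intro l hl c hc
      exact Or.inr (Or.inr ⟨l, List.mem_reverse.mp hl, hc⟩)
  | case2 cur acc h =>
      intro l hl c hc
      rcases List.mem_cons.mp (List.mem_reverse.mp hl) with h1 | h1
      · exact Or.inr (Or.inl (List.mem_reverse.mp (h1 ▸ hc)))
      · exact Or.inr (Or.inr ⟨l, h1, hc⟩)
  | case3 rest cur acc ih =>
      intro l hl c hc
      rcases ih l hl c hc with h1 | h1 | ⟨l', hl', hc'⟩
      · exact Or.inl (by simp [h1])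
      · simp at h1
      · rcases List.mem_cons.mp hl' with h2 | h2
        · exact Or.inr (Or.inl (List.mem_reverse.mp (h2 ▸ hc')))
        · exact Or.inr (Or.inr ⟨l', h2, hc'⟩)
  | case4 c0 rest cur acc hx h ih =>
      intro l hl c hc
      rcases ih l hl c hc with h1 | h1 | ⟨l', hl', hc'⟩
      · exact Or.inl (List.mem_cons_of_mem _ h1)
      · simp at h1
      · rcases List.mem_cons.mp hl' with h2 | h2
        · exact Or.inr (Or.inl (List.mem_reverse.mp (h2 ▸ hc')))
        · exact Or.inr (Or.inr ⟨l', h2, hc'⟩)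
  | case5 c0 rest cur acc hx h ih =>
      intro l hl c hc
      rcases ih l hl c hc with h1 | h1 | h1
      · exact Or.inl (List.mem_cons_of_mem _ h1)
      · rcases List.mem_cons.mp h1 with h2 | h2
        · exact Or.inl (h2 ▸ List.mem_cons_self)
        · exact Or.inr (Or.inl h2)
      · exact Or.inr (Or.inr h1)

theorem pv_splitlines_subset (s : String) :
    ∀ l ∈ PySem.Str.splitlines s, ∀ c ∈ l.toList, c ∈ s.toList := by
  intro l hl c hc
  have hl' : l.toList ∈ PySem.Chars.splitlines s.toList := by
    rw [← PySem.Str.splitlines_map_toList]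
    exact List.mem_map_of_mem hl
  have := pv_go_subset _ s.toList [] [] l.toList
    (by simpa [PySem.Chars.splitlines] using hl') c hc
  simpa using this

-- lines inside any group of the partition fold's final state come from the processed list
theorem pvB_mem (ls : List String) : ∀ (gs : List (List String)) (cur : List String),
    ∀ g ∈ (let st := List.foldl pvStepB (gs, cur) ls; st.1 ++ [st.2]), ∀ line ∈ g,
      (∃ g' ∈ gs, line ∈ g') ∨ line ∈ cur ∨ line ∈ ls := by
  induction ls with
  | nil =>
      intro gs cur g hg line hline
      simp only [List.foldl_nil] at hg
      rcases List.mem_append.mp hg with h1 | h1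
      · exact Or.inl ⟨g, h1, hline⟩
      · have : g = cur := by simpa using h1
        exact Or.inr (Or.inl (this ▸ hline))
  | cons l ls ih =>
      intro gs cur g hg line hline
      rw [List.foldl_cons] at hg
      by_cases h : l = ""
      · subst h
        have hstep : pvStepB (gs, cur) "" = (gs ++ [cur], []) := by simp [pvStepB]
        rw [hstep] at hg
        rcases ih (gs ++ [cur]) [] g hg line hline with ⟨g', hg', hlg'⟩ | h1 | h1
        · rcases List.mem_append.mp hg' with h2 | h2
          · exact Or.inl ⟨g', h2, hlg'⟩
          · have : g' = cur := by simpa using h2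
            exact Or.inr (Or.inl (this ▸ hlg'))
        · simp at h1
        · exact Or.inr (Or.inr (List.mem_cons_of_mem _ h1))
      · have hstep : pvStepB (gs, cur) l = (gs, cur ++ [l]) := by simp [pvStepB, h]
        rw [hstep] at hg
        rcases ih gs (cur ++ [l]) g hg line hline with h1 | h1 | h1
        · exact Or.inl h1
        · rcases List.mem_append.mp h1 with h2 | h2
          · exact Or.inr (Or.inl h2)
          · have : line = l := by simpa using h2
            exact Or.inr (Or.inr (this ▸ List.mem_cons_self))
        · exact Or.inr (Or.inr (List.mem_cons_of_mem _ h1))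

theorem pv_toNat_ofNat (n : Nat) (h : n < 128) : (Char.ofNat n).toNat = n := by
  have hv : n.isValidChar := Or.inl (by omega)
  simp [Char.ofNat, hv, Char.toNat, Char.ofNatAux]

-- counting the ASCII codes whose character occurs in xs = counting xs's distinct characters
theorem pv_range_count (xs : List Char) (hxs : ∀ c ∈ xs, c.toNat < 128) :
    (((List.range 128).filter (fun i => Char.ofNat i ∈ xs)).length)
      = (PySem.Set.ofList xs).length := by
  have hperm : ((List.range 128).filter (fun i => Char.ofNat i ∈ xs)).Perm
      ((PySem.Set.ofList xs).map Char.toNat) := by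
    rw [List.perm_ext_iff_of_nodup
      (List.Nodup.filter _ List.nodup_range)
      (List.Nodup.map (fun a b h => by rw [← Char.ofNat_toNat a, ← Char.ofNat_toNat b, h])
        (PySem.Set.nodup_ofList xs))]
    intro i
    simp only [List.mem_filter, List.mem_range, List.mem_map, PySem.Set.mem_ofList,
      decide_eq_true_eq]
    constructor
    · rintro ⟨hi, hm⟩
      exact ⟨Char.ofNat i, hm, pv_toNat_ofNat i hi⟩
    · rintro ⟨c, hc, rfl⟩
      exact ⟨hxs c hc, by rw [Char.ofNat_toNat]; exact hc⟩
  rw [hperm.length_eq, List.length_map]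

-- sum of a 0/1 indicator = filter length
theorem pv_sum_ind {α : Type} (l : List α) (p : α → Bool) :
    (l.map (fun x => if p x then (1 : Int) else 0)).sum = ((l.filter p).length : Int) := by
  induction l with
  | nil => simp
  | cons x l ih => by_cases h : p x <;> simp [h, ih, add_comm]

-- the char-major double count, summed the group-major way
theorem pv_swap (groups : List (List String))
    (h : ∀ g ∈ groups, ∀ line ∈ g, ∀ c ∈ line.toList, c.toNat < 128) :
    ((List.range 128).map (fun code => pvCharCount groups (Char.ofNat code))).sum
      = (groups.map pvGsize).sum := by
  induction groups with
  | nil => simp [pvCharCount]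
  | cons g gs ih =>
      have hstep : ∀ code : Nat, pvCharCount (g :: gs) (Char.ofNat code)
          = (if (g.any (fun line => line.toList.contains (Char.ofNat code))) then (1:Int) else 0)
            + pvCharCount gs (Char.ofNat code) := by
        intro code
        unfold pvCharCount
        rw [List.filter_cons]
        split_ifs with hp <;> simp <;> omega
      calc ((List.range 128).map (fun code => pvCharCount (g :: gs) (Char.ofNat code))).sum
          = ((List.range 128).map (fun code =>
              (if (g.any (fun line => line.toList.contains (Char.ofNat code))) then (1:Int) else 0)
              + pvCharCount gs (Char.ofNat code))).sum := by
            simp only [hstep]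
        _ = ((List.range 128).map (fun code =>
              if (g.any (fun line => line.toList.contains (Char.ofNat code))) then (1:Int) else 0)).sum
            + ((List.range 128).map (fun code => pvCharCount gs (Char.ofNat code))).sum := by
            rw [List.sum_map_add]
        _ = (pvGsize g) + (gs.map pvGsize).sum := by
            rw [ih (fun g' hg' => h g' (List.mem_cons_of_mem _ hg'))]
            congr 1
            rw [pv_sum_ind]
            unfold pvGsize
            have hmem : ∀ code : Nat, (g.any (fun line => line.toList.contains (Char.ofNat code)))
                = decide (Char.ofNat code ∈ g.flatMap String.toList) := by
              intro code
              rw [Bool.eq_iff_iff]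
              simp [List.any_eq_true, List.mem_flatMap]
            simp only [hmem]
            have := pv_range_count (g.flatMap String.toList)
              (fun c hc => by
                rcases List.mem_flatMap.mp hc with ⟨line, hline, hcl⟩
                exact h g List.mem_cons_self line hline c hcl)
            simp only [PySem.Set.len]
            rw [← this]
        _ = ((g :: gs).map pvGsize).sum := by simp

-- ===== VERDICT (by name: the statement is the Claim_ definition above) =====
theorem part1_spec : Claim_equal_part1 := by
  intro data hdom
  unfold Spec_part1 part1 part1_alt
  have hA := pvA_foldl (PySem.Str.splitlines data) 0 PySem.Set.empty
  have hB := pvB_foldl (PySem.Str.splitlines data) [] []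
  simp only at hA hB ⊢
  rw [hA]
  have hchars : ∀ g ∈ ((List.foldl pvStepB ([], []) (PySem.Str.splitlines data)).1
      ++ [(List.foldl pvStepB ([], []) (PySem.Str.splitlines data)).2]),
      ∀ line ∈ g, ∀ c ∈ line.toList, c.toNat < 128 := by
    intro g hg line hline c hc
    have h1 : line ∈ PySem.Str.splitlines data := by
      rcases pvB_mem (PySem.Str.splitlines data) [] [] g hg line hline with ⟨g', hg', _⟩ | h | h
      · simp at hg'
      · simp at h
      · exact h
    have h2 : c ∈ data.toList := pv_splitlines_subset data line h1 c hc
    have h3 : pvDomChar c = true := by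
      have hd := hdom
      unfold Dom_part1 pvDomStr at hd
      exact List.all_eq_true.mp hd c h2
    simp only [pvDomChar, Bool.or_eq_true, Bool.and_eq_true, decide_eq_true_eq, beq_iff_eq] at h3
    omega
  rw [pv_swap _ hchars, hB]
  simp [PySem.Set.ofList, PySem.Set.empty]
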